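-- pv_equiv track=rewrite | github.com/adigunner47/startup25 | streamlit_app.py | parse_neurips_prompts
-- ===== SOURCE A (Python) =====
-- def parse_neurips_prompts(content):
--     # Split the content into sections
--     sections = {"NeurIPS Review": []}
--     current_prompts = []
--
--     lines = content.split('\n')
--     i = 0
--     while i < len(lines):
--         line = lines[i].strip()
--         # Look for numbered prompts (e.g. "1. Briefly summarize...")
--         if line and line[0].isdigit() and ". " in line:
--             parts = line.split(". ", 1)
--             prompt_number = parts[0]
--             prompt_title = parts[1]
--
--             # Get the content (everything until the next numbered prompt)
--             i += 1
--             prompt_content = ""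
--             while i < len(lines) and not (i < len(lines) and lines[i].strip() and lines[i].strip()[0].isdigit() and ". " in lines[i].strip()):
--                 if lines[i].strip():
--                     prompt_content += lines[i] + '\n'
--                 i += 1
--             i -= 1  # Adjust for next iteration
--
--             # Create a properly formatted prompt that will work with the paper text
--             formatted_prompt = f"""Based on the following research paper, {prompt_title}
--
-- Paper text:
-- <idea>
--
-- Please provide a detailed response addressing this aspect of the review."""
--
--             # Add to the prompts
--             current_prompts.append((prompt_number, prompt_title, formatted_prompt))
--         i += 1
--
--     # Add all prompts to the NeurIPS Review section
--     sections["NeurIPS Review"] = current_prompts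
--
--     return sections
-- ===== SOURCE B (Python) =====
-- def parse_neurips_prompts(content):
--     current_prompts = []
--     for line in content.split('\n'):
--         stripped = line.strip()
--         if stripped and stripped[0].isdigit() and ". " in stripped:
--             number, title = stripped.split(". ", 1)
--             formatted_prompt = f"""Based on the following research paper, {title}
--
-- Paper text:
-- <idea>
--
-- Please provide a detailed response addressing this aspect of the review."""
--             current_prompts.append((number, title, formatted_prompt))
--     return {"NeurIPS Review": current_prompts}
-- ===== Notes on version B (the rewrite author's own statement) =====
-- stated objective: simpler
-- what changed: Replaced A's index-driven outer while loop with its content-consuming inner while loop and i-adjustment (whose accumulated prompt_content is never used) by a single flat for-loop over the lines that appends a tuple whenever the header predicate matches.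
import Mathlib
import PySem

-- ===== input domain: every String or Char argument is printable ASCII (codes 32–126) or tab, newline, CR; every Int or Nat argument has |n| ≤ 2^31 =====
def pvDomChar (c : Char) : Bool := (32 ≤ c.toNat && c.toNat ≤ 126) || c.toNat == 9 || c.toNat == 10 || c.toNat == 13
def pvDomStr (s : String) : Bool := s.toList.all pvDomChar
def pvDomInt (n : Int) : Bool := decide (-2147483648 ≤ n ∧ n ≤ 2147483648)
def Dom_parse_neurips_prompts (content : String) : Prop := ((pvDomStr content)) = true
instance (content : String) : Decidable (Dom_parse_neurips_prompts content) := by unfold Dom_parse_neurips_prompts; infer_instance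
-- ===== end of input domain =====

-- B replaces A's index-driven while loop (with its content-consuming inner while and the
-- i -= 1 adjustment, all of whose accumulated prompt_content is dead) by a single flat
-- for-loop over the lines; objective: simpler.

-- ===== PORT A =====

-- the header test A performs on a (already stripped) line: line and line[0].isdigit() and ". " in line
def pvHdrA (t : String) : Bool :=
  decide (t ≠ "") &&
    (match PySem.Str.pyGet? t 0 with
      | some c => PySem.Chars.isdigit c
      | none => false) &&
  PySem.Str.isIn ". " t

-- A's inner while loop: advances i past content lines, accumulating prompt_content (dead);
-- returns (final i, prompt_content)
def pvInnerA (lines : List String) (i : Nat) (pc : String) : Nat × String :=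
  if h : i < lines.length then
    if pvHdrA (PySem.Str.strip lines[i]) then (i, pc)
    else
      pvInnerA lines (i + 1)
        (if PySem.Str.strip lines[i] ≠ "" then pc ++ lines[i] ++ "\n" else pc)
  else (i, pc)
termination_by lines.length - i

theorem pvInnerA_ge (lines : List String) (i : Nat) (pc : String) :
    i ≤ (pvInnerA lines i pc).1 := by
  fun_induction pvInnerA lines i pc with
  | case1 => simp
  | case2 i pc h hh ih => rw [dite_eq_ite] at ih; omega
  | case3 => simp

-- A's outer while loop over the index i
def pvOuterA (lines : List String) (i : Nat)
    (acc : List (String × String × String)) : List (String × String × String) :=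
  if h : i < lines.length then
    let line := PySem.Str.strip lines[i]
    if pvHdrA line then
      let parts := (PySem.Str.splitMax? line ". " 1).getD []
      let prompt_number := parts.getD 0 ""
      let prompt_title := parts.getD 1 ""
      -- inner while, then i -= 1 followed by the outer i += 1
      let r := pvInnerA lines (i + 1) ""
      let formatted_prompt :=
        "Based on the following research paper, " ++ prompt_title ++
        "\n\nPaper text:\n<idea>\n\nPlease provide a detailed response addressing this aspect of the review."
      pvOuterA lines (r.1 - 1 + 1) (acc ++ [(prompt_number, prompt_title, formatted_prompt)])
    else
      pvOuterA lines (i + 1) acc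
  else acc
termination_by lines.length - i
decreasing_by
  · have := pvInnerA_ge lines (i + 1) ""
    omega
  · omega

def parse_neurips_prompts (content : String) : List (String × List (String × String × String)) :=
  [("NeurIPS Review", pvOuterA ((PySem.Str.split? content "\n").getD []) 0 [])]

-- ===== PORT B =====

-- B's header test on the stripped line (same predicate as A's code writes)
def pvHdrB (t : String) : Bool :=
  decide (t ≠ "") &&
    (match PySem.Str.pyGet? t 0 with
      | some c => PySem.Chars.isdigit c
      | none => false) &&
  PySem.Str.isIn ". " t

-- B's single flat pass: for line in lines, append the tuple when the header test fires
def pvStepB (acc : List (String × String × String)) (line : String) :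
    List (String × String × String) :=
  let stripped := PySem.Str.strip line
  if pvHdrB stripped then
    let parts := (PySem.Str.splitMax? stripped ". " 1).getD []
    let number := parts.getD 0 ""
    let title := parts.getD 1 ""
    let formatted_prompt :=
      "Based on the following research paper, " ++ title ++
      "\n\nPaper text:\n<idea>\n\nPlease provide a detailed response addressing this aspect of the review."
    acc ++ [(number, title, formatted_prompt)]
  else acc

def parse_neurips_prompts_alt (content : String) : List (String × List (String × String × String)) :=
  [("NeurIPS Review", ((PySem.Str.split? content "\n").getD []).foldl pvStepB [])]

-- ===== PRECONDITION & SPEC =====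
def Spec_parse_neurips_prompts (content : String) (out : List (String × List (String × String × String))) : Prop := out = parse_neurips_prompts_alt content
instance (content : String) (out : List (String × List (String × String × String))) : Decidable (Spec_parse_neurips_prompts content out) := by unfold Spec_parse_neurips_prompts; infer_instance

-- ===== CLAIM (what is proved, stated in full; the proofs are below) =====
def Claim_equal_parse_neurips_prompts : Prop := ∀ (content : String), Dom_parse_neurips_prompts content → Spec_parse_neurips_prompts content (parse_neurips_prompts content)

-- ===== LEMMAS AND PROOFS =====

theorem pvHdrB_eq_A : pvHdrB = pvHdrA := rfl

-- B's fold does not change over the lines A's inner loop skips (they all fail the header test)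
theorem foldB_skip (lines : List String) (i : Nat) (pc : String)
    (acc : List (String × String × String)) :
    (lines.drop (pvInnerA lines i pc).1).foldl pvStepB acc
      = (lines.drop i).foldl pvStepB acc := by
  fun_induction pvInnerA lines i pc with
  | case1 => rfl
  | case2 i pc h hh ih =>
    rw [dite_eq_ite] at ih
    rw [ih, List.drop_eq_getElem_cons h, List.foldl_cons]
    simp [pvStepB, pvHdrB_eq_A, hh]
  | case3 => rfl

-- A's outer index loop computes B's flat fold over the remaining lines
theorem outerA_eq_foldB (lines : List String) (i : Nat)
    (acc : List (String × String × String)) :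
    pvOuterA lines i acc = (lines.drop i).foldl pvStepB acc := by
  fun_induction pvOuterA lines i acc with
  | case1 i acc h line hcond parts number title r fmt ih =>
    rw [ih]
    have hge : i + 1 ≤ (pvInnerA lines (i + 1) "").1 := pvInnerA_ge lines (i + 1) ""
    have hr1 : r.1 - 1 + 1 = (pvInnerA lines (i + 1) "").1 := by
      have hr : r.1 = (pvInnerA lines (i + 1) "").1 := rfl
      rw [hr]; omega
    rw [hr1, foldB_skip, List.drop_eq_getElem_cons h, List.foldl_cons]
    congr 1
    have hc : pvHdrA (PySem.Str.strip lines[i]) = true := hcond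
    simp only [pvStepB, pvHdrB_eq_A, hc, if_pos]
    rfl
  | case2 i acc h line hcond ih =>
    rw [ih, List.drop_eq_getElem_cons h, List.foldl_cons]
    have hc : ¬ pvHdrA (PySem.Str.strip lines[i]) = true := hcond
    simp [pvStepB, pvHdrB_eq_A, hc]
  | case3 i acc h =>
    rw [List.drop_eq_nil_of_le (by omega)]; rfl

-- ===== VERDICT (by name: the statement is the Claim_ definition above) =====
theorem parse_neurips_prompts_spec : Claim_equal_parse_neurips_prompts := by
  intro content _
  unfold Spec_parse_neurips_prompts parse_neurips_prompts parse_neurips_prompts_alt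
  rw [outerA_eq_foldB]
  rfl
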